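-- pv_equiv track=rewrite | github.com/maheepindersinghmajithia/Python-Mini-Projects | alphabetic_palindrome.py | just_alph
-- ===== SOURCE A (Python) =====
-- def just_alph(s):
--     '''
--     consumes a string s and returns a string which contains only alphabets
--     of the original string in the same order of the entered string.
--
--     just_alph: Str -> Str
--     '''
--     x = ""
--     if s == "":
--         return x
--     elif s[0:1].isalpha():
--         return x + s[0:1] + just_alph(s[1:])
--     else:
--         return x + just_alph(s[1:])
-- ===== SOURCE B (Python) =====
-- def just_alph(s):
--     x = ""
--     for c in s:
--         if c.isalpha():
--             x += c
--     return x
-- ===== Notes on version B (the rewrite author's own statement) =====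
-- stated objective: faster
-- what changed: Replaced the self-recursion with per-character slicing and string concatenation by a single iterative accumulator loop over the characters.
import Mathlib
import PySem

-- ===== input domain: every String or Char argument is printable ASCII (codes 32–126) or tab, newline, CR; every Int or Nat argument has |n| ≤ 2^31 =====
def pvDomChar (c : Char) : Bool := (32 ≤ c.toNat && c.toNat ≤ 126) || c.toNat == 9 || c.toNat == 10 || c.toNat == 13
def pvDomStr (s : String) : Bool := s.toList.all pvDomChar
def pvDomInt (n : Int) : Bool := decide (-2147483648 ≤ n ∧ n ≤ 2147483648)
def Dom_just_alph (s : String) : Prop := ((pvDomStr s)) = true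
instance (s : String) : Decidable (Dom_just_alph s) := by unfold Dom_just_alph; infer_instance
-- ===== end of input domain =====

-- ===== PORT A =====
-- B replaces A's slice-based self-recursion by an iterative accumulator loop (measured faster); return values proved equal.
-- A: self-recursion peeling s[0:1], testing s[0:1].isalpha(), concatenating x + head + rest
def justAlphRecA : List Char → List Char
  | [] => []
  | c :: rest =>
      if PySem.Chars.strIsalpha [c] then [] ++ [c] ++ justAlphRecA rest
      else [] ++ justAlphRecA rest

def just_alph (s : String) : String := String.ofList (justAlphRecA s.toList)

-- ===== PORT B =====
-- B: iterative accumulator loop `for c in s: if c.isalpha(): x += c`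
def just_alph_alt (s : String) : String :=
  String.ofList (s.toList.foldl (fun x c => if PySem.Chars.isalpha c then x ++ [c] else x) [])

-- ===== PRECONDITION & SPEC =====
def Spec_just_alph (s : String) (out : String) : Prop := out = just_alph_alt s
instance (s : String) (out : String) : Decidable (Spec_just_alph s out) := by unfold Spec_just_alph; infer_instance

-- ===== CLAIM (what is proved, stated in full; the proofs are below) =====
def Claim_equal_just_alph : Prop := ∀ (s : String), Dom_just_alph s → Spec_just_alph s (just_alph s)

-- ===== LEMMAS AND PROOFS =====
theorem justAlph_foldl_eq (l : List Char) : ∀ (x : List Char),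
    l.foldl (fun x c => if PySem.Chars.isalpha c then x ++ [c] else x) x = x ++ justAlphRecA l := by
  induction l with
  | nil => intro x; simp [justAlphRecA]
  | cons c rest ih =>
      intro x
      simp only [List.foldl_cons, justAlphRecA, PySem.Chars.strIsalpha]
      by_cases h : PySem.Chars.isalpha c = true
      · simp [h, ih]
      · simp [h, ih]

-- ===== VERDICT (by name: the statement is the Claim_ definition above) =====
theorem just_alph_spec : Claim_equal_just_alph := by
  intro s _
  unfold Spec_just_alph just_alph just_alph_alt
  rw [justAlph_foldl_eq]
  simp
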